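-- pv_equiv track=rewrite | github.com/jheather11/potomac-sailing-prep | app.py | compact_wind_dir
-- ===== SOURCE A (Python) =====
-- def compact_wind_dir(seq):
--     seq = [str(x).strip() for x in seq if str(x).strip()]
--     if not seq:
--         return "--"
--     out = []
--     for x in seq:
--         if not out or out[-1] != x:
--             out.append(x)
--     if len(out) == 1:
--         return out[0]
--     return f"{out[0]}-{out[-1]}"
-- ===== SOURCE B (Python) =====
-- def compact_wind_dir(seq):
--     cleaned = [str(x).strip() for x in seq if str(x).strip()]
--     if not cleaned:
--         return "--"
--     first, last = cleaned[0], cleaned[-1]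
--     if len(set(cleaned)) == 1:
--         return first
--     return f"{first}-{last}"
-- ===== Notes on version B (the rewrite author's own statement) =====
-- stated objective: simpler
-- what changed: Replaces the consecutive-duplicate accumulator loop with a direct endpoint read (cleaned[0], cleaned[-1]) and an all-equal test via set(), since the output only depends on the first/last cleaned element and whether all elements coincide.
import Mathlib
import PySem

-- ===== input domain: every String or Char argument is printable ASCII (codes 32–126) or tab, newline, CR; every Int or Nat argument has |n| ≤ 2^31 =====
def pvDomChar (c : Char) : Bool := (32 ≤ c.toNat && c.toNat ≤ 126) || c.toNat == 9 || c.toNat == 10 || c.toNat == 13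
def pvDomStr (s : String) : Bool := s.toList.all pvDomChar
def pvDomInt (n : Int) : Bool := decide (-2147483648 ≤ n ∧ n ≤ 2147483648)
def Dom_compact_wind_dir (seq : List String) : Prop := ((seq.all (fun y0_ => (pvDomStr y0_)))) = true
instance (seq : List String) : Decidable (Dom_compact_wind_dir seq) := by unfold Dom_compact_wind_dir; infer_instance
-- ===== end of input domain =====

-- B differs from A only in decomposition: A keeps a dedup accumulator, B reads the endpoints directly.

-- ===== PORT A =====
-- loop body of A: append x unless it repeats the accumulator's last element
def pvStep (out : List String) (x : String) : List String :=
  if out = [] ∨ out.getLast? ≠ some x then out ++ [x] else out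

def compact_wind_dir (seq : List String) : String :=
  let s := (seq.map PySem.Str.strip).filter (fun x => x ≠ "")
  if s = [] then "--"
  else
    let out := s.foldl pvStep []
    if out.length = 1 then out.headD "" else out.headD "" ++ "-" ++ out.getLastD ""

-- ===== PORT B =====
def compact_wind_dir_alt (seq : List String) : String :=
  let cleaned := (seq.map PySem.Str.strip).filter (fun x => x ≠ "")
  if cleaned = [] then "--"
  else
    let first := cleaned.headD ""
    let last := cleaned.getLastD ""
    if (PySem.Set.ofList cleaned).length = 1 then first else first ++ "-" ++ last

-- ===== PRECONDITION & SPEC =====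
def Spec_compact_wind_dir (seq : List String) (out : String) : Prop := out = compact_wind_dir_alt seq
instance (seq : List String) (out : String) : Decidable (Spec_compact_wind_dir seq out) := by unfold Spec_compact_wind_dir; infer_instance

-- ===== CLAIM (what is proved, stated in full; the proofs are below) =====
def Claim_equal_compact_wind_dir : Prop := ∀ (seq : List String), Dom_compact_wind_dir seq → Spec_compact_wind_dir seq (compact_wind_dir seq)

-- ===== LEMMAS AND PROOFS =====

-- the accumulator keeps its head
lemma step_head (o : String) (os t : List String) :
    (t.foldl pvStep (o :: os)).head? = some o := by
  induction t generalizing os with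
  | nil => rfl
  | cons x t ih =>
      simp only [List.foldl_cons, pvStep]
      split
      · exact ih (os ++ [x])
      · exact ih os

-- after processing a nonempty tail, the accumulator's last element is the tail's last
lemma step_last (out t : List String) (h : t ≠ []) :
    (t.foldl pvStep out).getLast? = t.getLast? := by
  induction t generalizing out with
  | nil => exact absurd rfl h
  | cons x t ih =>
      cases t with
      | nil =>
          simp only [List.foldl_cons, List.foldl_nil, pvStep]
          split
          · simp
          · rename_i hc
            push Not at hc
            simp [hc.2]
      | cons y t' =>
          rw [List.foldl_cons, ih (pvStep out x) (by simp)]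
          simp

lemma step_len_mono (out t : List String) :
    out.length ≤ (t.foldl pvStep out).length := by
  induction t generalizing out with
  | nil => simp
  | cons x t ih =>
      simp only [List.foldl_cons, pvStep]
      split
      · exact le_trans (by simp) (ih (out ++ [x]))
      · exact ih out

-- the dedup accumulator started at [a] stays a singleton iff every later element equals a
lemma step_single (a : String) (t : List String) :
    (t.foldl pvStep [a]).length = 1 ↔ ∀ x ∈ t, x = a := by
  induction t with
  | nil => simp
  | cons x t ih =>
      by_cases hx : x = a
      · subst hx
        simp only [List.foldl_cons, pvStep]
        have : ¬ ([x] = [] ∨ ([x] : List String).getLast? ≠ some x) := by simp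
        rw [if_neg this]
        simpa using ih
      · constructor
        · intro h
          exfalso
          have : ([a, x] : List String).length ≤ ((x :: t).foldl pvStep [a]).length := by
            simp only [List.foldl_cons, pvStep]
            rw [if_pos (by simp [Ne.symm hx])]
            exact step_len_mono [a, x] t
          simp only [List.length_cons, List.length_nil] at this
          omega
        · intro h
          exact absurd (h x (by simp)) hx

lemma set_len_mono (s : PySem.Set String) (t : List String) :
    s.length ≤ (t.foldl PySem.Set.add s).length := by
  induction t generalizing s with
  | nil => simp
  | cons x t ih =>
      simp only [List.foldl_cons, PySem.Set.add]
      split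
      · exact ih s
      · exact le_trans (by simp) (ih (s ++ [x]))

-- set(a::t) is a singleton iff every element of t equals a
lemma set_single (a : String) (t : List String) :
    (PySem.Set.ofList (a :: t)).length = 1 ↔ ∀ x ∈ t, x = a := by
  rw [PySem.Set.ofList_eq_foldl]
  have h0 : PySem.Set.add [] a = [a] := by rfl
  simp only [List.foldl_cons, h0]
  induction t with
  | nil => simp
  | cons x t ih =>
      by_cases hx : x = a
      · subst hx
        have : PySem.Set.add [x] x = [x] := by
          simp [PySem.Set.add, PySem.Set.contains]
        simp only [List.foldl_cons, this]
        simpa using ih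
      · constructor
        · intro h
          exfalso
          have hadd : PySem.Set.add [a] x = [a, x] := by
            simp [PySem.Set.add, PySem.Set.contains, hx]
          have : ([a, x] : List String).length ≤ ((x :: t).foldl PySem.Set.add [a]).length := by
            simp only [List.foldl_cons, hadd]
            exact set_len_mono [a, x] t
          simp only [List.length_cons, List.length_nil] at this
          omega
        · intro h
          exact absurd (h x (by simp)) hx

-- ===== VERDICT (by name: the statement is the Claim_ definition above) =====
theorem compact_wind_dir_spec : Claim_equal_compact_wind_dir := by
  intro seq _
  show compact_wind_dir seq = compact_wind_dir_alt seq
  unfold compact_wind_dir compact_wind_dir_alt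
  cases hc : (seq.map PySem.Str.strip).filter (fun x => x ≠ "") with
  | nil => simp
  | cons a t =>
      simp only [List.headD_eq_head?_getD, List.getLastD_eq_getLast?, if_neg (List.cons_ne_nil a t)]
      have hfold : (a :: t).foldl pvStep [] = t.foldl pvStep [a] := by
        simp [pvStep]
      rw [hfold]
      have hhead : (t.foldl pvStep [a]).head? = some a := step_head a [] t
      have hlen : ((t.foldl pvStep [a]).length = 1) = ((PySem.Set.ofList (a :: t)).length = 1) := by
        rw [eq_iff_iff, step_single, set_single]
      cases ht : t with
      | nil =>
          have h1 : PySem.Set.ofList [a] = [a] := rfl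
          simp [h1]
      | cons y t' =>
          have hlast : (t.foldl pvStep [a]).getLast? = (a :: t).getLast? := by
            rw [step_last [a] t (by simp [ht])]
            simp [ht]
          rw [← ht]
          rw [hhead, hlast]
          simp only [hlen]
          simp
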